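-- pv_equiv track=rewrite | github.com/ponquersohn/aicli | aicli/tools/shell_tools.py | _is_dangerous_command
-- ===== SOURCE A (Python) =====
-- def _is_dangerous_command(command: str) -> bool:
--     """Check for potentially dangerous command patterns."""
--     dangerous_patterns = [
--         'rm -rf', 'rm -f', 'del ', 'format ', 'fdisk',
--         'mkfs', 'dd if=', 'dd of=', '> /dev/', 'chmod 777',
--         'chmod +x', 'sudo ', 'su ', 'passwd', 'useradd',
--         'userdel', 'kill -9', 'killall', 'pkill',
--         'wget ', 'curl ', 'ssh ', 'scp ', 'rsync ',
--         'mount ', 'umount ', 'systemctl', 'service ',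
--         'iptables', 'firewall', 'netsh', 'ifconfig',
--         'route ', 'ping -f', 'nmap ', 'nc ', 'netcat'
--     ]
--
--     command_lower = command.lower()
--     return any(pattern in command_lower for pattern in dangerous_patterns)
-- ===== SOURCE B (Python) =====
-- # Patterns grouped by their first character: at each position of the command we
-- # only test the tails of patterns whose first letter matches that position.
-- _TAILS_BY_FIRST_CHAR = {
--     'r': ['m -rf', 'm -f', 'sync ', 'oute '],
--     'd': ['el ', 'd if=', 'd of='],
--     'f': ['ormat ', 'disk', 'irewall'],
--     'm': ['kfs', 'ount '],
--     '>': [' /dev/'],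
--     'c': ['hmod 777', 'hmod +x', 'url '],
--     's': ['udo ', 'u ', 'sh ', 'cp ', 'ystemctl', 'ervice '],
--     'p': ['asswd', 'kill', 'ing -f'],
--     'u': ['seradd', 'serdel', 'mount '],
--     'k': ['ill -9', 'illall'],
--     'w': ['get '],
--     'i': ['ptables', 'fconfig'],
--     'n': ['etsh', 'map ', 'c ', 'etcat'],
-- }
--
--
-- def _is_dangerous_command(command: str) -> bool:
--     """Check for potentially dangerous command patterns."""
--     s = command.lower()
--     return any(s.startswith(tail, i + 1)
--                for i, c in enumerate(s)
--                for tail in _TAILS_BY_FIRST_CHAR.get(c, []))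
-- ===== Notes on version B (the rewrite author's own statement) =====
-- stated objective: alternative
-- what changed: Replaced the 37 independent substring-containment scans with a first-character dispatch index (a dict mapping each pattern's first letter to the pattern tails) driving one left-to-right sweep over the lowercased command: at each position only the tails of patterns starting with that character are tested with startswith.
import Mathlib
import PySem

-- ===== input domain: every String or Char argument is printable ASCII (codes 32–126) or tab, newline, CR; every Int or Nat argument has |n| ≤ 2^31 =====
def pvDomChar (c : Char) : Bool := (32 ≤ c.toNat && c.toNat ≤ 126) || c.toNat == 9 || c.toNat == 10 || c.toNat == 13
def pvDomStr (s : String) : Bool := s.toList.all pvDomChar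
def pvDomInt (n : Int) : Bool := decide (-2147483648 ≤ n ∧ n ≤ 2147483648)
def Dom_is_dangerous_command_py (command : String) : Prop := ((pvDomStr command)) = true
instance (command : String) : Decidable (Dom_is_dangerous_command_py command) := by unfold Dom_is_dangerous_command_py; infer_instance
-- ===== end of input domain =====

-- B replaces the 37 independent substring scans with a first-character dispatch dict (first letter → pattern tails) driving one left-to-right sweep (alternative decomposition, same cost class).


-- ===== PORT A =====
def pvDangerousPatterns : List String := [
  "rm -rf", "rm -f", "del ", "format ", "fdisk",
  "mkfs", "dd if=", "dd of=", "> /dev/", "chmod 777",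
  "chmod +x", "sudo ", "su ", "passwd", "useradd",
  "userdel", "kill -9", "killall", "pkill",
  "wget ", "curl ", "ssh ", "scp ", "rsync ",
  "mount ", "umount ", "systemctl", "service ",
  "iptables", "firewall", "netsh", "ifconfig",
  "route ", "ping -f", "nmap ", "nc ", "netcat"]

-- any(pattern in command_lower for pattern in dangerous_patterns)
def is_dangerous_command_py (command : String) : Bool :=
  let command_lower := PySem.Str.lower command
  pvDangerousPatterns.any (fun pattern => PySem.Str.isIn pattern command_lower)

-- ===== PORT B =====
-- the literal dict _TAILS_BY_FIRST_CHAR of Source B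
def pvTailsByFirstChar : PySem.Dict Char (List String) := PySem.Dict.mk [
  ('r', ["m -rf", "m -f", "sync ", "oute "]),
  ('d', ["el ", "d if=", "d of="]),
  ('f', ["ormat ", "disk", "irewall"]),
  ('m', ["kfs", "ount "]),
  ('>', [" /dev/"]),
  ('c', ["hmod 777", "hmod +x", "url "]),
  ('s', ["udo ", "u ", "sh ", "cp ", "ystemctl", "ervice "]),
  ('p', ["asswd", "kill", "ing -f"]),
  ('u', ["seradd", "serdel", "mount "]),
  ('k', ["ill -9", "illall"]),
  ('w', ["get "]),
  ('i', ["ptables", "fconfig"]),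
  ('n', ["etsh", "map ", "c ", "etcat"])]

-- any(s.startswith(tail, i + 1) for i, c in enumerate(s) for tail in _TAILS_BY_FIRST_CHAR.get(c, []))
-- s.startswith(tail, i+1) with 0 ≤ i+1 ≤ len(s) is exactly 'tail is a prefix of s[i+1:]' (exact here)
def is_dangerous_command_py_alt (command : String) : Bool :=
  let s := (PySem.Str.lower command).toList
  (PySem.List.enumerate s).any (fun ic =>
    ((pvTailsByFirstChar.get? ic.2).getD []).any (fun tail =>
      PySem.Chars.startswith (s.drop (ic.1.toNat + 1)) tail.toList))

-- ===== PRECONDITION & SPEC =====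
def Spec_is_dangerous_command_py (command : String) (out : Bool) : Prop := out = is_dangerous_command_py_alt command
instance (command : String) (out : Bool) : Decidable (Spec_is_dangerous_command_py command out) := by unfold Spec_is_dangerous_command_py; infer_instance

-- ===== CLAIM (what is proved, stated in full; the proofs are below) =====
def Claim_equal_is_dangerous_command_py : Prop := ∀ (command : String), Dom_is_dangerous_command_py command → Spec_is_dangerous_command_py command (is_dangerous_command_py command)

-- ===== LEMMAS AND PROOFS =====

-- first-match lookup in an assoc list with distinct keys, phrased existentially
theorem pv_get?_grouped (l : List (Char × List String)) (h : (l.map Prod.fst).Nodup)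
    (c : Char) (P : String → Prop) :
    (∃ t ∈ ((PySem.Dict.mk l).get? c).getD [], P t) ↔
      ∃ kv ∈ l, kv.1 = c ∧ ∃ t ∈ kv.2, P t := by
  induction l with
  | nil => simp [PySem.Dict.get?]
  | cons kv rest ih =>
    rw [PySem.Dict.get?_mk_cons]
    simp only [List.map_cons, List.nodup_cons] at h
    by_cases hk : kv.1 = c
    · subst hk
      simp only [beq_self_eq_true, if_pos, Option.getD_some, List.mem_cons]
      constructor
      · rintro ht; exact ⟨kv, Or.inl rfl, rfl, ht⟩
      · rintro ⟨kv', hmem, hc, ht⟩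
        rcases hmem with rfl | hmem
        · exact ht
        · exact absurd (hc ▸ (List.mem_map_of_mem hmem : kv'.1 ∈ rest.map Prod.fst)) h.1
    · rw [if_neg (by simpa using hk)]
      rw [ih h.2]
      constructor
      · rintro ⟨kv', hmem, hc, ht⟩; exact ⟨kv', List.mem_cons_of_mem _ hmem, hc, ht⟩
      · rintro ⟨kv', hmem, hc, ht⟩
        rcases List.mem_cons.mp hmem with rfl | hmem
        · exact absurd hc hk
        · exact ⟨kv', hmem, hc, ht⟩

-- the flattened index (first char reattached) is a permutation of A's pattern list, as char lists
theorem pv_perm :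
    (pvDangerousPatterns.map String.toList).Perm
      ((PySem.Dict.items pvTailsByFirstChar).flatMap
        (fun kv => kv.2.map (fun t => kv.1 :: t.toList))) := by
  decide

theorem pv_keys_nodup : ((PySem.Dict.items pvTailsByFirstChar).map Prod.fst).Nodup := by decide

theorem pv_patterns_ne_nil : ∀ p ∈ pvDangerousPatterns, p.toList ≠ [] := by decide

-- per-position bridge: some pattern is a prefix of s.drop k  ↔  the index fires at position k
theorem pv_pos_bridge (s : List Char) (k : Nat) (hk : k < s.length) :
    (∃ p ∈ pvDangerousPatterns, p.toList <+: s.drop k) ↔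
      ∃ t ∈ ((pvTailsByFirstChar.get? s[k]).getD []), t.toList <+: s.drop (k + 1) := by
  rw [pv_get?_grouped _ pv_keys_nodup]
  have hdrop : s.drop k = s[k] :: s.drop (k + 1) := (List.getElem_cons_drop hk).symm
  constructor
  · rintro ⟨p, hp, hpre⟩
    have := (List.Perm.mem_iff pv_perm).mp (List.mem_map_of_mem hp (f := String.toList))
    rcases List.mem_flatMap.mp this with ⟨kv, hkv, hmem⟩
    rcases List.mem_map.mp hmem with ⟨t, ht, heq⟩
    rw [← heq, hdrop, List.cons_prefix_cons] at hpre
    exact ⟨kv, hkv, hpre.1, t, ht, hpre.2⟩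
  · rintro ⟨kv, hkv, hc, t, ht, hpre⟩
    have hmem : (kv.1 :: t.toList) ∈
        (PySem.Dict.items pvTailsByFirstChar).flatMap
          (fun kv => kv.2.map (fun t => kv.1 :: t.toList)) :=
      List.mem_flatMap.mpr ⟨kv, hkv, List.mem_map_of_mem ht⟩
    rcases List.mem_map.mp ((List.Perm.mem_iff pv_perm).mpr hmem) with ⟨p, hp, heq⟩
    refine ⟨p, hp, ?_⟩
    rw [heq, hdrop, List.cons_prefix_cons]
    exact ⟨hc, hpre⟩

-- ===== VERDICT (by name: the statement is the Claim_ definition above) =====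
theorem is_dangerous_command_py_spec : Claim_equal_is_dangerous_command_py := by
  intro command _
  unfold Spec_is_dangerous_command_py is_dangerous_command_py is_dangerous_command_py_alt
  rw [Bool.eq_iff_iff]
  simp only [List.any_eq_true, PySem.Str.isIn_eq, PySem.List.mem_enumerate_iff,
    PySem.Chars.startswith_iff]
  constructor
  · rintro ⟨p, hp, hin⟩
    obtain ⟨j, hj⟩ := (PySem.Chars.exists_prefix_drop_iff_isIn _ _).mpr hin
    set s := (PySem.Str.lower command).toList with hs
    by_cases hlt : j < s.length
    · obtain ⟨t, ht, hpre⟩ := (pv_pos_bridge s j hlt).mp ⟨p, hp, hj⟩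
      refine ⟨((j : Int), s[j]), ⟨j, hlt, by simp⟩, t, ht, ?_⟩
      simpa using hpre
    · exfalso
      rw [List.drop_eq_nil_of_le (le_of_not_gt hlt)] at hj
      exact pv_patterns_ne_nil p hp (List.prefix_nil.mp hj)
  · rintro ⟨ic, ⟨k, hk, rfl⟩, t, ht, hpre⟩
    simp only [zero_add, Int.toNat_natCast] at hpre ht
    obtain ⟨p, hp, hj⟩ := (pv_pos_bridge _ k hk).mpr ⟨t, ht, hpre⟩
    exact ⟨p, hp, (PySem.Chars.exists_prefix_drop_iff_isIn _ _).mp ⟨k, hj⟩⟩
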